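-- pv_equiv track=rewrite | github.com/thealper2/codewars-solutions | 7-kyu/esrever_esrever.py | esrever
-- ===== SOURCE A (Python) =====
-- def esrever(s):
--     if not s:
--         return s
--
--     punctuation = s[-1] if s[-1] in {'.', '?', '!'} else ''
--     text = s[:-1] if punctuation else s
--     words = text.split()
--     reversed_words = [word[::-1] for word in reversed(words)]
--     result = ' '.join(reversed_words) + punctuation
--     return result
-- ===== SOURCE B (Python) =====
-- def esrever(s):
--     if not s:
--         return s
--     body, punctuation = (s[:-1], s[-1]) if s[-1] in '.?!' else (s, '')
--     words = []
--     cur = ''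
--     for ch in body:
--         if ch.isspace():
--             if cur:
--                 words.insert(0, cur)
--                 cur = ''
--         else:
--             cur = ch + cur
--     if cur:
--         words.insert(0, cur)
--     return ' '.join(words) + punctuation
-- ===== Notes on version B (the rewrite author's own statement) =====
-- stated objective: alternative
-- what changed: B replaces split/reverse/per-word-slice with a single left-to-right character pass that prepends each character to the current word and prepends each finished word to the word list, so no split(), no list reversal and no slicing are used.
import Mathlib
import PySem

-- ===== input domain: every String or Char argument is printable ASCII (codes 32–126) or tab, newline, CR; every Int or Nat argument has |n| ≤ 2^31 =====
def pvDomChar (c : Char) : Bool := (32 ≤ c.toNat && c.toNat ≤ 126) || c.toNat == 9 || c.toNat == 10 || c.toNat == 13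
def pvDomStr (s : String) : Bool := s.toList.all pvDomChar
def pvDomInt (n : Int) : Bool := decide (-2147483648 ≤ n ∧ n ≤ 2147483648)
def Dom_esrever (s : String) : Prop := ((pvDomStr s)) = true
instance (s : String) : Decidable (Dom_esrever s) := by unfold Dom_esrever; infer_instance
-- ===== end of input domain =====

-- B replaces split/reverse/per-word-slice with one character pass that prepends chars to the current word and finished words to the word list; same result, different decomposition.

-- ===== PORT A =====
def esrever (s : String) : String :=
  if s = "" then s
  else
    let punctuation : String :=
      match PySem.Str.pyGet? s (-1) with
      | some c =>
          if PySem.Set.contains (PySem.Set.ofList ['.', '?', '!']) c then String.ofList [c] else ""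
      | none => ""
    let text : String := if punctuation == "" then s else PySem.Str.slice s none (some (-1))
    let words : List String := PySem.Str.split₀ text
    let reversedWords : List String :=
      words.reverse.map (fun w => (PySem.Str.slice? w none none (-1)).getD "")
    PySem.Str.join " " reversedWords ++ punctuation

-- ===== PORT B =====
-- the for-loop over body's characters, with the trailing `if cur:` flush as the base case;
-- cur is built by prepending (ch + cur), words by insert(0, cur)
def esreverLoop : List Char → List Char → List String → List String
  | [], cur, words => if cur.isEmpty then words else String.ofList cur :: words
  | c :: rest, cur, words =>
    if PySem.Chars.isspace c then
      if cur.isEmpty then esreverLoop rest [] words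
      else esreverLoop rest [] (String.ofList cur :: words)
    else esreverLoop rest (c :: cur) words

def esrever_alt (s : String) : String :=
  if s = "" then s
  else
    let bp : String × String :=
      match PySem.Str.pyGet? s (-1) with
      | some c =>
          if c ∈ ['.', '?', '!'] then (PySem.Str.slice s none (some (-1)), String.ofList [c])
          else (s, "")
      | none => (s, "")
    PySem.Str.join " " (esreverLoop bp.1.toList [] []) ++ bp.2

-- ===== PRECONDITION & SPEC =====
def Spec_esrever (s : String) (out : String) : Prop := out = esrever_alt s
instance (s : String) (out : String) : Decidable (Spec_esrever s out) := by unfold Spec_esrever; infer_instance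

-- ===== CLAIM =====
def Claim_equal_esrever : Prop := ∀ (s : String), Dom_esrever s → Spec_esrever s (esrever s)

-- ===== LEMMAS AND PROOFS =====

-- the words of a char list: maximal runs of non-whitespace characters (Python str.split())
def wordsSpec : List Char → List (List Char)
  | [] => []
  | c :: rest =>
    if PySem.Chars.isspace c then wordsSpec rest
    else (c :: rest.takeWhile (fun d => !PySem.Chars.isspace d)) ::
         wordsSpec (rest.dropWhile (fun d => !PySem.Chars.isspace d))
termination_by l => l.length
decreasing_by
  · simp only [List.length_cons]; omega
  · simp only [List.length_cons]
    exact Nat.lt_succ_of_le (rest.length_dropWhile_le _)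

theorem go_acc (l : List Char) : ∀ (cur : List Char) (acc : List (List Char)),
    PySem.Chars.split₀.go l cur acc = acc.reverse ++ PySem.Chars.split₀.go l cur [] := by
  intro cur acc
  induction l generalizing cur acc with
  | nil => simp only [PySem.Chars.split₀.go]; split <;> simp
  | cons c rest ih =>
    simp only [PySem.Chars.split₀.go]
    split
    · split
      · exact ih _ _
      · rw [ih [] (cur.reverse :: acc), ih [] [cur.reverse]]; simp
    · exact ih _ _

theorem wordsSpec_all_nonspace (l : List Char) (hne : l ≠ [])
    (h : ∀ c ∈ l, PySem.Chars.isspace c = false) : wordsSpec l = [l] := by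
  match l with
  | [] => exact absurd rfl hne
  | c :: rest =>
    rw [wordsSpec, if_neg (by simp [h c (by simp)]),
      List.takeWhile_eq_self_iff.mpr (by intro x hx; simp [h x (by simp [hx])]),
      List.dropWhile_eq_nil_iff.mpr (by intro x hx; simp [h x (by simp [hx])])]
    rw [wordsSpec]

theorem wordsSpec_append_space (c : Char) (hc : PySem.Chars.isspace c = true)
    (ys zs : List Char) : wordsSpec (ys ++ c :: zs) = wordsSpec ys ++ wordsSpec zs := by
  induction ys using wordsSpec.induct with
  | case1 => simp [wordsSpec, hc]
  | case2 d rest hd ih => simp [wordsSpec, hd, ih]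
  | case3 d rest hd ih =>
    rw [List.cons_append, wordsSpec, if_neg hd, wordsSpec, if_neg hd]
    by_cases hall : ∀ x ∈ rest, (fun d => !PySem.Chars.isspace d) x = true
    · rw [List.takeWhile_append, if_pos (by rw [List.takeWhile_eq_self_iff.mpr hall]),
        List.dropWhile_append,
        if_pos (by rw [List.dropWhile_eq_nil_iff.mpr hall]; rfl),
        List.takeWhile_eq_self_iff.mpr hall, List.dropWhile_eq_nil_iff.mpr hall,
        List.takeWhile_cons_of_neg (by simp [hc]), List.dropWhile_cons_of_neg (by simp [hc])]
      simp [wordsSpec, hc]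
    · have hlen : ¬ (rest.takeWhile (fun d => !PySem.Chars.isspace d)).length = rest.length := by
        intro h
        exact hall (List.takeWhile_eq_self_iff.mp ((rest.takeWhile_prefix _).eq_of_length h))
      have hdw : ¬ (rest.dropWhile (fun d => !PySem.Chars.isspace d)).isEmpty = true := by
        simp only [List.isEmpty_iff, List.dropWhile_eq_nil_iff]
        exact hall
      rw [List.takeWhile_append, if_neg hlen, List.dropWhile_append, if_neg hdw, ih]
      simp

theorem go_eq_wordsSpec (l : List Char) : ∀ (cur : List Char),
    (∀ a ∈ cur, PySem.Chars.isspace a = false) →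
    PySem.Chars.split₀.go l cur []
      = if cur.isEmpty then wordsSpec l
        else (cur.reverse ++ l.takeWhile (fun d => !PySem.Chars.isspace d)) ::
             wordsSpec (l.dropWhile (fun d => !PySem.Chars.isspace d)) := by
  intro cur hcur
  induction l generalizing cur hcur with
  | nil =>
    simp only [PySem.Chars.split₀.go]
    split <;> simp_all [wordsSpec]
  | cons c rest ih =>
    simp only [PySem.Chars.split₀.go]
    by_cases hc : PySem.Chars.isspace c
    · rw [if_pos hc]
      by_cases he : cur.isEmpty
      · rw [if_pos he, ih [] (by simp), List.isEmpty_iff.mp he]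
        simp [wordsSpec, hc]
      · rw [if_neg he, go_acc, ih [] (by simp), if_neg he,
          List.takeWhile_cons_of_neg (by simp [hc]),
          List.dropWhile_cons_of_neg (by simp [hc]), wordsSpec, if_pos hc]
        simp
    · rw [if_neg hc, ih (c :: cur) ?_]
      · rw [if_neg (by simp)]
        by_cases he : cur.isEmpty
        · rw [if_pos he, List.isEmpty_iff.mp he, wordsSpec, if_neg hc]
          simp
        · rw [if_neg he, List.takeWhile_cons_of_pos (by simp [hc]),
            List.dropWhile_cons_of_pos (by simp [hc])]
          simp
      · intro a ha
        rcases List.mem_cons.mp ha with h | h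
        · subst h; simpa using hc
        · exact hcur a h

theorem split₀_eq_wordsSpec (l : List Char) : PySem.Chars.split₀ l = wordsSpec l := by
  have h := go_eq_wordsSpec l [] (by simp)
  simp only [List.isEmpty_nil, if_true] at h
  exact h

-- B's loop computes the words in reverse order, each word's characters reversed
theorem esreverLoop_spec (l : List Char) : ∀ (cur : List Char) (ws : List String),
    (∀ a ∈ cur, PySem.Chars.isspace a = false) →
    esreverLoop l cur ws
      = ((wordsSpec (cur.reverse ++ l)).reverse.map (fun w => String.ofList w.reverse)) ++ ws := by
  induction l with
  | nil =>
    intro cur ws hcur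
    simp only [esreverLoop, List.append_nil]
    by_cases he : cur.isEmpty
    · rw [if_pos he, List.isEmpty_iff.mp he]
      simp [wordsSpec]
    · rw [if_neg he,
        wordsSpec_all_nonspace cur.reverse (by simpa [List.isEmpty_iff] using he)
          (by intro a ha; exact hcur a (List.mem_reverse.mp ha))]
      simp
  | cons c rest ih =>
    intro cur ws hcur
    simp only [esreverLoop]
    by_cases hc : PySem.Chars.isspace c
    · rw [if_pos hc]
      by_cases he : cur.isEmpty
      · rw [if_pos he, ih [] ws (by simp), List.isEmpty_iff.mp he]
        simp [wordsSpec, hc]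
      · rw [if_neg he, ih [] (String.ofList cur :: ws) (by simp),
          show cur.reverse ++ c :: rest = cur.reverse ++ c :: rest from rfl,
          wordsSpec_append_space c hc cur.reverse rest,
          wordsSpec_all_nonspace cur.reverse (by simpa [List.isEmpty_iff] using he)
            (by intro a ha; exact hcur a (List.mem_reverse.mp ha))]
        simp
    · rw [if_neg hc, ih (c :: cur) ws ?_]
      · rw [show (c :: cur).reverse ++ rest = cur.reverse ++ c :: rest by simp]
      · intro a ha
        rcases List.mem_cons.mp ha with h | h
        · subst h; simpa using hc
        · exact hcur a h

-- the two word lists are equal, hence the joined results are equal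
theorem key_join (t p : String) :
    PySem.Str.join " " ((PySem.Str.split₀ t).reverse.map
        (fun w => (PySem.Str.slice? w none none (-1)).getD "")) ++ p
    = PySem.Str.join " " (esreverLoop t.toList [] []) ++ p := by
  have hmap : List.map String.toList (PySem.Str.split₀ t) = wordsSpec t.toList := by
    rw [PySem.Str.split₀_map_toList, split₀_eq_wordsSpec]
  have hlists : (PySem.Str.split₀ t).reverse.map
        (fun w => (PySem.Str.slice? w none none (-1)).getD "")
      = esreverLoop t.toList [] [] := by
    rw [esreverLoop_spec t.toList [] [] (by simp), List.append_nil, List.reverse_nil, List.nil_append]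
    have hinj : Function.Injective (List.map String.toList) :=
      List.map_injective_iff.mpr (fun a b h => String.toList_inj.mp h)
    apply hinj
    simp only [List.map_map, Function.comp_def, PySem.Str.slice?_none_none_neg_one,
      Option.getD_some, String.toList_ofList]
    rw [← hmap]
    simp only [List.map_reverse, List.map_map]
    rfl
  rw [hlists]

-- ===== VERDICT =====
theorem esrever_spec : Claim_equal_esrever := by
  intro s _
  unfold Spec_esrever esrever esrever_alt
  split
  · rfl
  · cases hg : PySem.Str.pyGet? s (-1) with
    | none => simpa [hg] using key_join s ""
    | some c =>
      by_cases hc : c ∈ ['.', '?', '!']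
      · have hcontains : PySem.Set.contains (PySem.Set.ofList ['.', '?', '!']) c = true := by
          fin_cases hc <;> decide
        simp only [hc, if_true, hcontains]
        have hne : (String.ofList [c] == "") = false := by
          refine beq_eq_false_iff_ne.mpr (fun h => ?_)
          have := congrArg String.toList h
          simp at this
        simpa [hne] using key_join (PySem.Str.slice s none (some (-1))) (String.ofList [c])
      · have hcontains : PySem.Set.contains (PySem.Set.ofList ['.', '?', '!']) c = false := by
          simp only [List.mem_cons] at hc
          push Not at hc
          simp [PySem.Set.contains, PySem.Set.ofList, hc.1, hc.2.1, hc.2.2]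
        simpa [hg, hc, hcontains] using key_join s ""
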